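-- pv_equiv track=rewrite | github.com/LyzhinIvan/AoC-2021 | 10.py | part1
-- ===== SOURCE A (Python) =====
-- OPEN_TO_CLOSE = {
--     '(': ')',
--     '[': ']',
--     '{': '}',
--     '<': '>',
-- }
--
-- OPENS = OPEN_TO_CLOSE.keys()
--
-- def part1(input):
--     s = {
--         ')': 3,
--         ']': 57,
--         '}': 1197,
--         '>': 25137,
--     }
--     score = 0
--     for line in input.strip().split('\n'):
--         stack = []
--         for c in line:
--             if c in OPENS:
--                 stack.append(c)
--             else:
--                 if not stack:
--                     break
--                 elif OPEN_TO_CLOSE[stack[-1]] != c: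
--                     score += s[c]
--                     break
--                 stack.pop()
--     return score
-- ===== SOURCE B (Python) =====
-- MATCH = {
--     '(': ')',
--     '[': ']',
--     '{': '}',
--     '<': '>',
-- }
--
--
-- def parse_chunks(rest):
--     """Parse a maximal sequence of complete chunks at the front of rest.
--
--     Returns (error, remainder): error is the syntax-error score of the first
--     corrupt closer found inside the chunks (None if none), and remainder is
--     the unparsed tail of the line."""
--     scores = {')': 3, ']': 57, '}': 1197, '>': 25137}
--     while rest and rest[0] in MATCH:
--         err, inner = parse_chunks(rest[1:])
--         if err is not None:
--             return err, inner
--         if not inner: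
--             return None, inner          # incomplete chunk: line just ends
--         if inner[0] != MATCH[rest[0]]:
--             return scores[inner[0]], inner   # corrupt chunk: wrong closer
--         rest = inner[1:]
--     return None, rest
--
--
-- def part1(input):
--     total = 0
--     for line in input.strip().split('\n'):
--         err, _ = parse_chunks(line)
--         if err is not None:
--             total += err
--     return total
-- ===== Notes on version B (the rewrite author's own statement) =====
-- stated objective: alternative
-- what changed: Replaces A's explicit-stack left-to-right scan by a recursive-descent parser of the chunk grammar (a chunk = opener, nested chunks, matching closer), returning the score of the first corrupt closer; Pre_ excludes exactly the inputs where A raises KeyError (a line whose first bracket violation mismatches a character with no score entry), where B raises the same KeyError.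
import Mathlib
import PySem

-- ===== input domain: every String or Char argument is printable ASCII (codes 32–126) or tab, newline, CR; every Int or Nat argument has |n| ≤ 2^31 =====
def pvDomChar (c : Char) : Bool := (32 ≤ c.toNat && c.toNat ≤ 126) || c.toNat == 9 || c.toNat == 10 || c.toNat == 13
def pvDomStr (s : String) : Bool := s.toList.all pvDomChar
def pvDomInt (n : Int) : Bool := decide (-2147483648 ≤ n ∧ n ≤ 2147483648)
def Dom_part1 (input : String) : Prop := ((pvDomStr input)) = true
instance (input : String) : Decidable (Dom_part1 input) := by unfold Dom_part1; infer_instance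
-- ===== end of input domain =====

-- B replaces A's explicit-stack scan by a recursive-descent parser of the chunk
-- grammar (objective: alternative decomposition, similar cost). Equivalence of the
-- RETURN value is proved on Pre_ (which excludes exactly the KeyError inputs).

-- ===== PORT A =====
def pvO2C : PySem.Dict Char Char :=
  PySem.Dict.ofList [('(', ')'), ('[', ']'), ('{', '}'), ('<', '>')]

def pvOpens : List Char := PySem.Dict.keys pvO2C

def pvScores : PySem.Dict Char Int :=
  PySem.Dict.ofList [(')', 3), (']', 57), ('}', 1197), ('>', 25137)]

/-- Inner loop of A over one line.  The Python stack grows at the right end;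
here the head of `stack` is Python's `stack[-1]` (push = cons, pop = tail).
`s[c]` is `(get? …).getD 0`: a missing key is a Python `KeyError`, excluded by `Pre_`. -/
def pvLineA : List Char → List Char → Int
  | [], _ => 0
  | c :: rest, stack =>
    if c ∈ pvOpens then pvLineA rest (c :: stack)
    else
      match stack with
      | [] => 0                                   -- `if not stack: break`
      | t :: st' =>
        if PySem.Dict.get? pvO2C t ≠ some c then (PySem.Dict.get? pvScores c).getD 0
        else pvLineA rest st'

def part1 (input : String) : Int :=
  (PySem.Chars.splitOn (PySem.Chars.strip input.toList) ['\n']).foldl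
    (fun score line => score + pvLineA line []) 0

-- ===== PORT B =====
def pvClose : PySem.Dict Char Char :=
  PySem.Dict.ofList [('(', ')'), ('[', ']'), ('{', '}'), ('<', '>')]

def pvScoresB : PySem.Dict Char Int :=
  PySem.Dict.ofList [(')', 3), (']', 57), ('}', 1197), ('>', 25137)]

/-- B's `parse_chunks`: parse a maximal sequence of complete chunks at the front of
`rest`, returning (error, remainder).  Python's recursion terminates on its own;
here a `fuel` counter (called with `rest.length`, always sufficient since each
step consumes at least one character) makes the same recursion structural.
`scores[inner[0]]` is `(get? …).getD 0`: a missing key is a `KeyError`, excluded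
by `Pre_`. -/
def pvParse : Nat → List Char → Option Int × List Char
  | 0, rest => (none, rest)
  | fuel+1, rest =>
    match rest with
    | [] => (none, [])
    | c :: tl =>
      match PySem.Dict.get? pvClose c with
      | none => (none, c :: tl)                   -- head is not an opener: the loop ends
      | some cl =>
        match pvParse fuel tl with
        | (some e, inner) => (some e, inner)
        | (none, inner) =>
          match inner with
          | [] => (none, [])                      -- incomplete chunk: line just ends
          | d :: inner' =>
            if d ≠ cl then (some ((PySem.Dict.get? pvScoresB d).getD 0), d :: inner')
            else pvParse fuel inner'

def part1_alt (input : String) : Int :=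
  (PySem.Chars.splitOn (PySem.Chars.strip input.toList) ['\n']).foldl
    (fun total line =>
      match (pvParse line.length line).1 with
      | some e => total + e
      | none => total) 0

-- ===== PRECONDITION & SPEC =====
/-- Pre_ excludes exactly the inputs on which the Python A raises `KeyError` (a line whose
first bracket violation is a mismatch against a character that has no score entry);
the Python B raises the same `KeyError` there. -/
def pvSafe : List Char → List Char → Bool
  | [], _ => true
  | c :: rest, stack =>
    if c = '(' ∨ c = '[' ∨ c = '{' ∨ c = '<' then pvSafe rest (c :: stack)
    else
      match stack with
      | [] => true
      | t :: st' =>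
        if (t = '(' ∧ c = ')') ∨ (t = '[' ∧ c = ']') ∨ (t = '{' ∧ c = '}') ∨ (t = '<' ∧ c = '>')
        then pvSafe rest st'
        else c = ')' ∨ c = ']' ∨ c = '}' ∨ c = '>'

def Pre_part1 (input : String) : Prop :=
  (PySem.Chars.splitOn (PySem.Chars.strip input.toList) ['\n']).all
    (fun l => pvSafe l []) = true
instance (input : String) : Decidable (Pre_part1 input) := by unfold Pre_part1; infer_instance

def pvWitness_part1 : String := "[(()<\n(]"

def Spec_part1 (input : String) (out : Int) : Prop := out = part1_alt input
instance (input : String) (out : Int) : Decidable (Spec_part1 input out) := by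
  unfold Spec_part1; infer_instance

-- ===== CLAIM (what is proved, stated in full; the proofs are below) =====
def Claim_equal_part1 : Prop :=
  ∀ (input : String), Dom_part1 input → Pre_part1 input → Spec_part1 input (part1 input)

-- ===== LEMMAS AND PROOFS =====

/-- `(o, c)` is one of the four matched bracket pairs. -/
def pvIsPair (o c : Char) : Bool :=
  (o = '(' && c = ')') || (o = '[' && c = ']') || (o = '{' && c = '}') || (o = '<' && c = '>')

theorem pvOpens_eq : pvOpens = ['(', '[', '{', '<'] := by decide

theorem pvClose_eq : pvClose = pvO2C := rfl

theorem get?_pvO2C_eq (t c : Char) :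
    PySem.Dict.get? pvO2C t = some c ↔ pvIsPair t c = true := by
  have hitems : pvO2C.items = [('(', ')'), ('[', ']'), ('{', '}'), ('<', '>')] := by decide
  simp only [PySem.Dict.get?, hitems]
  by_cases h1 : t = '('
  · subst h1; simp [List.find?, pvIsPair, eq_comm]
  by_cases h2 : t = '['
  · subst h2; simp [List.find?, pvIsPair, eq_comm]
  by_cases h3 : t = '{'
  · subst h3; simp [List.find?, pvIsPair, eq_comm]
  by_cases h4 : t = '<'
  · subst h4; simp [List.find?, pvIsPair, eq_comm]
  have b1 : ('(' == t) = false := by simp [Ne.symm h1]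
  have b2 : ('[' == t) = false := by simp [Ne.symm h2]
  have b3 : ('{' == t) = false := by simp [Ne.symm h3]
  have b4 : ('<' == t) = false := by simp [Ne.symm h4]
  simp [List.find?, b1, b2, b3, b4, pvIsPair, h1, h2, h3, h4]

theorem mem_pvOpens_of_pair {t c : Char} (h : pvIsPair t c = true) : t ∈ pvOpens := by
  simp only [pvIsPair, Bool.or_eq_true, Bool.and_eq_true, decide_eq_true_eq] at h
  rw [pvOpens_eq]
  rcases h with (((⟨rfl, _⟩ | ⟨rfl, _⟩) | ⟨rfl, _⟩) | ⟨rfl, _⟩) <;> simp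

theorem closer_not_open {t c : Char} (h : pvIsPair t c = true) : c ∉ pvOpens := by
  simp only [pvIsPair, Bool.or_eq_true, Bool.and_eq_true, decide_eq_true_eq] at h
  rw [pvOpens_eq]
  rcases h with (((⟨_, rfl⟩ | ⟨_, rfl⟩) | ⟨_, rfl⟩) | ⟨_, rfl⟩) <;> decide

theorem get?_pvO2C_none {c : Char} (h : PySem.Dict.get? pvO2C c = none) : c ∉ pvOpens := by
  rw [pvOpens_eq]
  intro hm
  fin_cases hm <;> simp_all [show PySem.Dict.get? pvO2C '(' = some ')' from by decide,
    show PySem.Dict.get? pvO2C '[' = some ']' from by decide,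
    show PySem.Dict.get? pvO2C '{' = some '}' from by decide,
    show PySem.Dict.get? pvO2C '<' = some '>' from by decide]

/-- The parser, run with enough fuel, computes exactly A's stack scan: an error
score is A's score under any stack; a clean parse consumes a balanced prefix
(A's scan passes through it unchanged) and stops before a non-opener. -/
theorem parse_spec : ∀ (fuel : Nat) (l : List Char), l.length ≤ fuel →
    (pvParse fuel l).2.length ≤ l.length ∧
    (∀ e r, pvParse fuel l = (some e, r) → ∀ st, pvLineA l st = e) ∧
    (∀ r, pvParse fuel l = (none, r) →
        (∀ st, pvLineA l st = pvLineA r st) ∧ ∀ d r', r = d :: r' → d ∉ pvOpens) := by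
  intro fuel
  induction fuel with
  | zero =>
    intro l hl
    have : l = [] := List.eq_nil_of_length_eq_zero (Nat.le_zero.mp hl)
    subst this
    refine ⟨by simp [pvParse], ?_, ?_⟩
    · intro e r h; simp [pvParse] at h
    · intro r h
      simp only [pvParse, Prod.mk.injEq] at h
      exact ⟨fun st => by rw [h.2], fun d r' hr => by simp [← h.2] at hr⟩
  | succ fuel ih =>
    intro l hl
    cases l with
    | nil =>
      refine ⟨by simp [pvParse], ?_, ?_⟩
      · intro e r h; simp [pvParse] at h
      · intro r h
        simp only [pvParse, Prod.mk.injEq] at h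
        exact ⟨fun st => by rw [← h.2], fun d r' hr => by simp [← h.2] at hr⟩
    | cons c tl =>
      have htl : tl.length ≤ fuel := by simp [List.length_cons] at hl; omega
      cases hg : PySem.Dict.get? pvClose c with
      | none =>
        have hco : c ∉ pvOpens := get?_pvO2C_none (pvClose_eq ▸ hg)
        refine ⟨by simp [pvParse, hg], ?_, ?_⟩
        · intro e r h; simp [pvParse, hg] at h
        · intro r h
          simp only [pvParse, hg, Prod.mk.injEq] at h
          refine ⟨fun st => by rw [← h.2], fun d r' hr => ?_⟩
          rw [← h.2] at hr
          injection hr with h1 _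
          exact h1 ▸ hco
      | some cl =>
        have hg' : PySem.Dict.get? pvO2C c = some cl := pvClose_eq ▸ hg
        have hpair : pvIsPair c cl = true := (get?_pvO2C_eq c cl).mp hg'
        have hcopen : c ∈ pvOpens := mem_pvOpens_of_pair hpair
        obtain ⟨ihlen, ihsome, ihnone⟩ := ih tl htl
        have hstep : ∀ st, pvLineA (c :: tl) st = pvLineA tl (c :: st) := by
          intro st; simp [pvLineA, hcopen]
        cases hp : pvParse fuel tl with
        | mk err inner =>
          rw [hp] at ihlen
          cases err with
          | some e =>
            have hA : ∀ st, pvLineA tl st = e := ihsome e inner hp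
            refine ⟨by simp [pvParse, hg, hp]; simp at ihlen; omega, ?_, ?_⟩
            · intro e' r h
              simp only [pvParse, hg, hp, Prod.mk.injEq] at h
              intro st
              rw [hstep st, hA (c :: st)]
              exact Option.some.inj h.1
            · intro r h; simp [pvParse, hg, hp] at h
          | none =>
            obtain ⟨hA, hhead⟩ := ihnone inner hp
            cases inner with
            | nil =>
              refine ⟨by simp [pvParse, hg, hp], ?_, ?_⟩
              · intro e r h; simp [pvParse, hg, hp] at h
              · intro r h
                simp only [pvParse, hg, hp, Prod.mk.injEq] at h
                refine ⟨fun st => ?_, fun d r' hr => by simp [← h.2] at hr⟩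
                rw [hstep st, hA (c :: st), ← h.2]
                rfl
            | cons d inner' =>
              have hdno : d ∉ pvOpens := hhead d inner' rfl
              by_cases hd : d = cl
              · subst hd
                have hmatch : ∀ st, pvLineA (d :: inner') (c :: st) = pvLineA inner' st := by
                  intro st
                  have : ¬ (PySem.Dict.get? pvO2C c ≠ some d) := by
                    simp [hg']
                  simp [pvLineA, closer_not_open hpair, this]
                have hin' : inner'.length ≤ fuel := by
                  simp [List.length_cons] at ihlen; omega
                obtain ⟨ihlen2, ihsome2, ihnone2⟩ := ih inner' hin'
                have hred : pvParse (fuel+1) (c :: tl) = pvParse fuel inner' := by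
                  simp [pvParse, hg, hp]
                have hchain : ∀ st, pvLineA (c :: tl) st = pvLineA inner' st := by
                  intro st
                  rw [hstep st, hA (c :: st), hmatch st]
                refine ⟨?_, ?_, ?_⟩
                · rw [hred]
                  simp [List.length_cons] at ihlen ⊢
                  omega
                · intro e r h
                  rw [hred] at h
                  intro st
                  rw [hchain st]
                  exact ihsome2 e r h st
                · intro r h
                  rw [hred] at h
                  obtain ⟨h1, h2⟩ := ihnone2 r h
                  exact ⟨fun st => by rw [hchain st, h1 st], h2⟩
              · have hmis : ∀ st, pvLineA (d :: inner') (c :: st)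
                    = (PySem.Dict.get? pvScores d).getD 0 := by
                  intro st
                  have hne : PySem.Dict.get? pvO2C c ≠ some d := by
                    rw [hg']
                    simp [Ne.symm hd]
                  simp [pvLineA, hdno, hne]
                have hred : pvParse (fuel+1) (c :: tl)
                    = (some ((PySem.Dict.get? pvScoresB d).getD 0), d :: inner') := by
                  simp [pvParse, hg, hp, hd]
                refine ⟨by rw [hred]; simp [List.length_cons] at ihlen ⊢; omega, ?_, ?_⟩
                · intro e r h
                  rw [hred] at h
                  injection h with h1 _
                  intro st
                  rw [hstep st, hA (c :: st), hmis st]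
                  exact Option.some.inj h1
                · intro r h
                  rw [hred] at h
                  simp at h

/-- Per line: A's stack scan equals B's parse result (0 on a clean parse). -/
theorem lineA_eq_parse (line : List Char) :
    pvLineA line [] = (match (pvParse line.length line).1 with
                       | some e => e | none => 0) := by
  obtain ⟨_, hsome, hnone⟩ := parse_spec line.length line (le_refl _)
  cases hp : pvParse line.length line with
  | mk err r =>
    cases err with
    | some e => exact hsome e r hp []
    | none =>
      obtain ⟨hA, hhead⟩ := hnone r hp
      rw [hA []]
      cases r with
      | nil => rfl
      | cons d r' => simp [pvLineA, hhead d r' rfl]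


-- ===== VERDICT (by name: the statement is the Claim_ definition above) =====
theorem part1_spec : Claim_equal_part1 := by
  intro input _ _
  unfold Spec_part1 part1 part1_alt
  have hf : (fun (score : Int) line => score + pvLineA line [])
      = (fun (total : Int) line =>
          match (pvParse line.length line).1 with
          | some e => total + e
          | none => total) := by
    funext s line
    rw [lineA_eq_parse]
    cases (pvParse line.length line).1 <;> simp
  rw [hf]
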